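-- pv_equiv track=rewrite | github.com/alishalabi/practice_2024 | coding_problems/words_with_duplicate_letters.py | no_duplicate_letters
-- ===== SOURCE A (Python) =====
-- def no_duplicate_letters(sentence):
--     word_array = sentence.split(" ")
--     for word in word_array:
--         all_letters = set()
--         for letter in word:
--             if letter in all_letters:
--                 return False
--             else:
--                 all_letters.add(letter)
--     return True
-- ===== SOURCE B (Python) =====
-- def no_duplicate_letters(sentence):
--     # Sort each word's letters; a repeated letter then appears as two
--     # equal adjacent letters, so it suffices to scan adjacent pairs.
--     for word in sentence.split(" "):
--         s = sorted(word)
--         for a, b in zip(s, s[1:]):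
--             if a == b:
--                 return False
--     return True
-- ===== Notes on version B (the rewrite author's own statement) =====
-- stated objective: alternative
-- what changed: Instead of growing a per-word seen-set with an early-exit membership test, B sorts each word's letters and scans adjacent pairs for an equal neighbour (a duplicate exists iff the sorted word has two equal adjacent letters).
import Mathlib
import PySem

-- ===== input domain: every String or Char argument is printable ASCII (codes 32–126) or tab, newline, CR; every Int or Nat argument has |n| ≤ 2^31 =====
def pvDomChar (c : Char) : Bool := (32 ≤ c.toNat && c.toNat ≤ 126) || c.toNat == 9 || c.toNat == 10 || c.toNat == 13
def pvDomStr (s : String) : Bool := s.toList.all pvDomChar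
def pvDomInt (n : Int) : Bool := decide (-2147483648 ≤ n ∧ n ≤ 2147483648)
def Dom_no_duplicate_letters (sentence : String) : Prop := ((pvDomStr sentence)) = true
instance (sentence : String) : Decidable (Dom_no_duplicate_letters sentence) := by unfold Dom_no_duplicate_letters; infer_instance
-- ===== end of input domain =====

-- B: instead of A's per-word seen-set with early exit, B sorts each word's letters and
-- scans adjacent pairs for an equal neighbour (alternative algorithm, same task).


-- ===== PORT A =====
-- inner loop of A: running set of letters seen so far, early False on a repeat
def pvCheckWordA : List Char → PySem.Set Char → Bool
  | [], _ => true
  | c :: rest, s =>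
      if PySem.Set.contains s c then false
      else pvCheckWordA rest (PySem.Set.add s c)

-- outer loop of A over the words; the early 'return False' is the short-circuit &&
def pvLoopA : List (List Char) → Bool
  | [] => true
  | w :: ws => pvCheckWordA w PySem.Set.empty && pvLoopA ws

def no_duplicate_letters (sentence : String) : Bool :=
  pvLoopA (PySem.Chars.splitOn sentence.toList [' '])

-- ===== PORT B =====
-- B's inner loop: 'for a, b in zip(s, s[1:]): if a == b: return False'
def pvNoAdjEq : List Char → Bool
  | a :: b :: rest => a != b && pvNoAdjEq (b :: rest)
  | _ => true

-- B's outer loop over the words, sorting each word first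
def pvLoopB : List (List Char) → Bool
  | [] => true
  | w :: ws => pvNoAdjEq (PySem.List.sorted w (fun c => c) false) && pvLoopB ws

def no_duplicate_letters_alt (sentence : String) : Bool :=
  pvLoopB (PySem.Chars.splitOn sentence.toList [' '])

-- ===== PRECONDITION & SPEC =====
def Spec_no_duplicate_letters (sentence : String) (out : Bool) : Prop := out = no_duplicate_letters_alt sentence
instance (sentence : String) (out : Bool) : Decidable (Spec_no_duplicate_letters sentence out) := by unfold Spec_no_duplicate_letters; infer_instance

-- ===== CLAIM (what is proved, stated in full; the proofs are below) =====
def Claim_equal_no_duplicate_letters : Prop := ∀ (sentence : String), Dom_no_duplicate_letters sentence → Spec_no_duplicate_letters sentence (no_duplicate_letters sentence)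

-- ===== LEMMAS AND PROOFS =====

-- A's inner loop succeeds iff the remaining letters are distinct and avoid the seen-set
theorem pv_checkWordA_iff (cs : List Char) (s : PySem.Set Char) :
    pvCheckWordA cs s = true ↔ (cs.Nodup ∧ ∀ c ∈ cs, c ∉ s) := by
  induction cs generalizing s with
  | nil => simp [pvCheckWordA]
  | cons c rest ih =>
      simp only [pvCheckWordA]
      by_cases h : PySem.Set.contains s c = true
      · have hc : c ∈ s := (PySem.Set.contains_iff s c).mp h
        simp only [if_pos h]
        constructor
        · intro hf; exact absurd hf (by simp)
        · rintro ⟨-, hall⟩; exact absurd hc (hall c (List.mem_cons_self ..))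
      · have hc : c ∉ s := fun hm => h ((PySem.Set.contains_iff s c).mpr hm)
        rw [if_neg h, ih]
        constructor
        · rintro ⟨hnd, hall⟩
          refine ⟨List.nodup_cons.mpr ⟨?_, hnd⟩, ?_⟩
          · intro hmem
            exact (hall c hmem) ((PySem.Set.mem_add (s := s) c c).mpr (Or.inr rfl))
          · intro x hx
            rcases List.mem_cons.mp hx with rfl | hx
            · exact hc
            · intro hxs
              exact (hall x hx) ((PySem.Set.mem_add (s := s) c x).mpr (Or.inl hxs))
        · rintro ⟨hnd, hall⟩
          rcases List.nodup_cons.mp hnd with ⟨hcn, hrn⟩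
          refine ⟨hrn, ?_⟩
          intro x hx hxadd
          rcases (PySem.Set.mem_add (s := s) c x).mp hxadd with hxs | hxc
          · exact (hall x (List.mem_cons_of_mem _ hx)) hxs
          · exact hcn (hxc ▸ hx)

-- on a (weakly) sorted list, no equal adjacent pair ⟺ no duplicate anywhere
theorem pv_noAdjEq_iff (l : List Char) (hs : l.Pairwise (· ≤ ·)) :
    pvNoAdjEq l = true ↔ l.Nodup := by
  induction l with
  | nil => simp [pvNoAdjEq]
  | cons a t ih =>
      cases t with
      | nil => simp [pvNoAdjEq]
      | cons b rest =>
          rcases List.pairwise_cons.mp hs with ⟨hall, hs'⟩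
          have hab : a ≤ b := hall b (List.mem_cons_self ..)
          have hbrest : ∀ x ∈ rest, b ≤ x := (List.pairwise_cons.mp hs').1
          rw [show pvNoAdjEq (a :: b :: rest) = (a != b && pvNoAdjEq (b :: rest)) from rfl,
            Bool.and_eq_true, bne_iff_ne, ih hs']
          constructor
          · rintro ⟨hne, hrn⟩
            have hlt : a < b := lt_of_le_of_ne hab hne
            refine List.nodup_cons.mpr ⟨?_, hrn⟩
            intro hmem
            rcases List.mem_cons.mp hmem with rfl | hx
            · exact hne rfl
            · exact absurd (lt_of_lt_of_le hlt (hbrest a hx)) (lt_irrefl a)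
          · intro h
            rcases List.nodup_cons.mp h with ⟨hna, hrn⟩
            exact ⟨fun hEq => hna (hEq ▸ List.mem_cons_self ..), hrn⟩

-- the two inner checks agree on every word
theorem pv_word_eq (w : List Char) :
    pvCheckWordA w PySem.Set.empty = pvNoAdjEq (PySem.List.sorted w (fun c => c) false) := by
  have hperm : (PySem.List.sorted w (fun c => c) false).Perm w := PySem.List.sorted_perm ..
  have hpw : (PySem.List.sorted w (fun c => c) false).Pairwise (· ≤ ·) :=
    PySem.List.sorted_pairwise ..
  rw [Bool.eq_iff_iff, pv_checkWordA_iff, pv_noAdjEq_iff _ hpw, hperm.nodup_iff]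
  simp [PySem.Set.empty]

theorem pv_loop_eq (ws : List (List Char)) : pvLoopA ws = pvLoopB ws := by
  induction ws with
  | nil => rfl
  | cons w rest ih =>
      simp only [pvLoopA, pvLoopB]
      rw [pv_word_eq, ih]

-- ===== VERDICT (by name: the statement is the Claim_ definition above) =====
theorem no_duplicate_letters_spec : Claim_equal_no_duplicate_letters := by
  intro sentence _
  unfold Spec_no_duplicate_letters no_duplicate_letters no_duplicate_letters_alt
  exact pv_loop_eq _
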